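-- pv_equiv track=rewrite | github.com/IsmaelNjama/njama-nebius-assignment | app/utils/parse_readme_sections.py | parse_readme_sections
-- ===== SOURCE A (Python) =====
-- def parse_readme_sections(readme: str) -> str:
--     """Parse README markdown into a human-readable plain-text string.
--     """
--     if not readme:
--         return ""
--
--     sections = {}
--     current_section = "Overview"
--     current_content = []
--
--     for line in readme.splitlines():
--         if line.startswith("## "):
--             if current_content:
--                 sections[current_section] = "\n".join(current_content).strip()
--             current_section = line[3:].strip()
--             current_content = []
--         else:
--             current_content.append(line)
--
--     if current_content:
--         sections[current_section] = "\n".join(current_content).strip()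
--
--     # Build a readable string from sections
--     parts = []
--     for title, content in sections.items():
--         parts.append(f"{title}:\n{content}")
--
--     return "\n\n".join(parts)
-- ===== SOURCE B (Python) =====
-- def parse_readme_sections(readme: str) -> str:
--     """Parse README markdown into a human-readable plain-text string."""
--     lines = readme.splitlines()
--     heads = [i for i, ln in enumerate(lines) if ln.startswith("## ")]
--     cuts = heads + [len(lines)]
--     spans = [("Overview", lines[0:cuts[0]])] + [
--         (lines[h][3:].strip(), lines[h + 1:nxt]) for h, nxt in zip(heads, cuts[1:])
--     ]
--     sections = {}
--     for title, seg in spans: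
--         if seg:
--             sections[title] = "\n".join(seg).strip()
--     return "\n\n".join(f"{t}:\n{c}" for t, c in sections.items())
-- ===== Notes on version B (the rewrite author's own statement) =====
-- stated objective: alternative
-- what changed: Replaces A's single stateful loop (mutating current-section/current-content accumulators with in-loop dict flushes) by a two-phase decomposition: first locate all level-2 header line indices, then slice each section's line range out between consecutive cut points and build the dict in one separate pass.
import Mathlib
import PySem

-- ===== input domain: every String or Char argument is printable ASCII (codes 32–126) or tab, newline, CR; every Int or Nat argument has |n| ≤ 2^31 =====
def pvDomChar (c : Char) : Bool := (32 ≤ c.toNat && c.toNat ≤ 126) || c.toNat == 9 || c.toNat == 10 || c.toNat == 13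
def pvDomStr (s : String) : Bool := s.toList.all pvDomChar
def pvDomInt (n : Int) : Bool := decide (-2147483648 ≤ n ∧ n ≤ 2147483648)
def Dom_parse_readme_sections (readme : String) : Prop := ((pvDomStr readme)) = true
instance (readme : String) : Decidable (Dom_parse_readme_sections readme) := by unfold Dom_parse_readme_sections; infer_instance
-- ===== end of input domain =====

-- B replaces A's single stateful accumulation loop by a two-phase header-index/slice decomposition
-- (find the level-2 header line positions, then slice each section out between consecutive cut points);
-- objective: alternative decomposition, same cost.

-- ===== PORT A =====
-- loop state = (sections dict, current_section, current_content), exactly A's loop variables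
def pvAStep (st : PySem.Dict String String × String × List String) (line : String) :
    PySem.Dict String String × String × List String :=
  if PySem.Str.startswith line "## " then
    let d := if st.2.2 ≠ [] then st.1.insert st.2.1 (PySem.Str.strip (PySem.Str.join "\n" st.2.2)) else st.1
    (d, PySem.Str.strip (PySem.Str.slice line (some 3) none), [])
  else
    (st.1, st.2.1, st.2.2 ++ [line])

def parse_readme_sections (readme : String) : String :=
  if readme = "" then ""
  else
    let fin := (PySem.Str.splitlines readme).foldl pvAStep (PySem.Dict.empty, "Overview", [])
    let sections :=
      if fin.2.2 ≠ [] then fin.1.insert fin.2.1 (PySem.Str.strip (PySem.Str.join "\n" fin.2.2)) else fin.1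
    let parts := sections.items.foldl (fun acc tc => acc ++ [tc.1 ++ ":\n" ++ tc.2]) []
    PySem.Str.join "\n\n" parts

-- ===== PORT B =====
-- lines[h] in Source B is indexed with an in-range non-negative h, so List.getD-style pyGetD is exact
def parse_readme_sections_alt (readme : String) : String :=
  let lines := PySem.Str.splitlines readme
  let heads := ((PySem.List.enumerate lines).filter (fun p => PySem.Str.startswith p.2 "## ")).map (·.1)
  let cuts := heads ++ [PySem.List.len lines]
  let spans := ("Overview", PySem.List.slice lines (some 0) (some (PySem.List.pyGetD cuts 0 0))) ::
    (heads.zip (PySem.List.slice cuts (some 1) none)).map (fun hn =>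
      (PySem.Str.strip (PySem.Str.slice (PySem.List.pyGetD lines hn.1 "") (some 3) none),
       PySem.List.slice lines (some (hn.1 + 1)) (some hn.2)))
  let sections := spans.foldl
    (fun d ts => if ts.2 ≠ [] then d.insert ts.1 (PySem.Str.strip (PySem.Str.join "\n" ts.2)) else d)
    PySem.Dict.empty
  PySem.Str.join "\n\n" (sections.items.map (fun tc => tc.1 ++ ":\n" ++ tc.2))

-- ===== PRECONDITION & SPEC =====
def Spec_parse_readme_sections (readme : String) (out : String) : Prop := out = parse_readme_sections_alt readme
instance (readme : String) (out : String) : Decidable (Spec_parse_readme_sections readme out) := by unfold Spec_parse_readme_sections; infer_instance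

-- ===== CLAIM (what is proved, stated in full; the proofs are below) =====
def Claim_equal_parse_readme_sections : Prop := ∀ (readme : String), Dom_parse_readme_sections readme → Spec_parse_readme_sections readme (parse_readme_sections readme)

-- ===== LEMMAS AND PROOFS =====

-- names for the pieces of B's computation
def pvHeads (lines : List String) : List Int :=
  ((PySem.List.enumerate lines).filter (fun p => PySem.Str.startswith p.2 "## ")).map (·.1)
def pvCuts (lines : List String) : List Int := pvHeads lines ++ [PySem.List.len lines]
def pvLead (lines : List String) : List String :=
  PySem.List.slice lines (some 0) (some (PySem.List.pyGetD (pvCuts lines) 0 0))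
def pvTail (lines : List String) : List (String × List String) :=
  ((pvHeads lines).zip (PySem.List.slice (pvCuts lines) (some 1) none)).map (fun hn =>
    (PySem.Str.strip (PySem.Str.slice (PySem.List.pyGetD lines hn.1 "") (some 3) none),
     PySem.List.slice lines (some (hn.1 + 1)) (some hn.2)))

-- the recursive segmentation that both programs compute
def pvSegs (t : String) (acc : List String) : List String → List (String × List String)
  | [] => [(t, acc)]
  | l :: rest =>
    if PySem.Str.startswith l "## " then
      (t, acc) :: pvSegs (PySem.Str.strip (PySem.Str.slice l (some 3) none)) [] rest
    else pvSegs t (acc ++ [l]) rest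

def pvIns (d : PySem.Dict String String) (ts : String × List String) : PySem.Dict String String :=
  if ts.2 ≠ [] then d.insert ts.1 (PySem.Str.strip (PySem.Str.join "\n" ts.2)) else d

theorem pvA_loop_eq (lines : List String) :
    ∀ (d : PySem.Dict String String) (t : String) (acc : List String),
      (if (lines.foldl pvAStep (d, t, acc)).2.2 ≠ [] then
        (lines.foldl pvAStep (d, t, acc)).1.insert (lines.foldl pvAStep (d, t, acc)).2.1
          (PySem.Str.strip (PySem.Str.join "\n" (lines.foldl pvAStep (d, t, acc)).2.2))
      else (lines.foldl pvAStep (d, t, acc)).1)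
      = (pvSegs t acc lines).foldl pvIns d := by
  induction lines with
  | nil => intro d t acc; simp [pvSegs, pvIns]
  | cons l rest ih =>
    intro d t acc
    by_cases h : PySem.Str.startswith l "## " = true
    · simp only [pvSegs, h, if_pos, List.foldl_cons, pvAStep, ih, pvIns]
    · simp only [pvSegs, List.foldl_cons, pvAStep, eq_false_of_ne_true h, if_false, ih,
        Bool.false_eq_true]

theorem pvGetD_cons_shift {α : Type} (x : α) (xs : List α) (h : Int) (d : α) (hh : 0 ≤ h) :
    PySem.List.pyGetD (x :: xs) (h + 1) d = PySem.List.pyGetD xs h d := by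
  obtain ⟨k, rfl⟩ : ∃ k : Nat, h = (k : Int) := ⟨h.toNat, (Int.toNat_of_nonneg hh).symm⟩
  rw [show ((k : Int) + 1) = ((k + 1 : Nat) : Int) by push_cast; ring,
    PySem.List.pyGetD_natCast, PySem.List.pyGetD_natCast]
  simp

theorem pvSlice_cons_shift {α : Type} (x : α) (xs : List α) (a b : Int)
    (ha : 0 ≤ a) (hb : 0 ≤ b) :
    PySem.List.slice (x :: xs) (some (a + 1)) (some (b + 1)) =
      PySem.List.slice xs (some a) (some b) := by
  rw [PySem.List.slice_toNat _ (by omega) (by omega), PySem.List.slice_toNat _ ha hb]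
  rw [show (a + 1).toNat = a.toNat + 1 by omega, show (b + 1).toNat = b.toNat + 1 by omega]
  simp [List.drop_succ_cons]

theorem pvEnumShift {α : Type} (xs : List α) (s : Int) :
    PySem.List.enumerate xs (s + 1) = (PySem.List.enumerate xs s).map (fun p => (p.1 + 1, p.2)) := by
  induction xs generalizing s with
  | nil => simp [PySem.List.enumerate_nil]
  | cons x t ih => simp [PySem.List.enumerate_cons, ih]

theorem pvEnumShift1 {α : Type} (xs : List α) :
    PySem.List.enumerate xs 1 = (PySem.List.enumerate xs 0).map (fun p => (p.1 + 1, p.2)) := by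
  simpa using pvEnumShift xs 0

theorem pvHeads_cons_pos (l : String) (rest : List String)
    (h : PySem.Str.startswith l "## " = true) :
    pvHeads (l :: rest) = 0 :: (pvHeads rest).map (· + 1) := by
  simp only [pvHeads, PySem.List.enumerate_cons, zero_add, pvEnumShift1, List.filter_map,
    List.map_map, List.filter_cons]
  simp only [PySem.Str.startswith_eq] at h
  rw [show "## ".toList = [Char.ofNat 35, Char.ofNat 35, Char.ofNat 32] from rfl] at h
  simp [h, Function.comp_def]

theorem pvHeads_cons_neg (l : String) (rest : List String)
    (h : PySem.Str.startswith l "## " = false) :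
    pvHeads (l :: rest) = (pvHeads rest).map (· + 1) := by
  simp only [pvHeads, PySem.List.enumerate_cons, zero_add, pvEnumShift1, List.filter_map,
    List.map_map, List.filter_cons]
  simp only [PySem.Str.startswith_eq] at h
  rw [show "## ".toList = [Char.ofNat 35, Char.ofNat 35, Char.ofNat 32] from rfl] at h
  simp [h, Function.comp_def]

theorem pvHeads_nonneg (lines : List String) : ∀ x ∈ pvHeads lines, 0 ≤ x := by
  intro x hx
  simp only [pvHeads, List.mem_map, List.mem_filter] at hx
  obtain ⟨p, ⟨hp, _⟩, rfl⟩ := hx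
  rcases (PySem.List.mem_enumerate_iff _ _ _).1 hp with ⟨k, hk, rfl⟩
  simp

theorem pvCuts_nonneg (lines : List String) : ∀ x ∈ pvCuts lines, 0 ≤ x := by
  intro x hx
  rcases List.mem_append.1 hx with h | h
  · exact pvHeads_nonneg lines x h
  · simp only [List.mem_singleton] at h; subst h
    simp [PySem.List.len_eq]

theorem pvCuts_cons_pos (l : String) (rest : List String)
    (h : PySem.Str.startswith l "## " = true) :
    pvCuts (l :: rest) = 0 :: (pvCuts rest).map (· + 1) := by
  simp [pvCuts, pvHeads_cons_pos l rest h, PySem.List.len_eq]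

theorem pvCuts_cons_neg (l : String) (rest : List String)
    (h : PySem.Str.startswith l "## " = false) :
    pvCuts (l :: rest) = (pvCuts rest).map (· + 1) := by
  simp [pvCuts, pvHeads_cons_neg l rest h, PySem.List.len_eq]

theorem pvCuts_ne_nil (lines : List String) : pvCuts lines ≠ [] := by
  simp [pvCuts]

theorem pvLead_cons_pos (l : String) (rest : List String)
    (h : PySem.Str.startswith l "## " = true) : pvLead (l :: rest) = [] := by
  rw [pvLead, pvCuts_cons_pos l rest h]
  simp only [PySem.List.pyGetD_zero_cons]
  rw [PySem.List.slice_toNat _ le_rfl le_rfl]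
  simp

theorem pvLead_cons_neg (l : String) (rest : List String)
    (h : PySem.Str.startswith l "## " = false) : pvLead (l :: rest) = l :: pvLead rest := by
  rw [pvLead, pvCuts_cons_neg l rest h, pvLead]
  rcases hc : pvCuts rest with _ | ⟨c0, ct⟩
  · exact absurd hc (pvCuts_ne_nil rest)
  have hc0 : 0 ≤ c0 := pvCuts_nonneg rest c0 (by simp [hc])
  simp only [List.map_cons, PySem.List.pyGetD_zero_cons]
  rw [PySem.List.slice_toNat _ le_rfl (by omega), PySem.List.slice_toNat _ le_rfl hc0]
  simp only [Int.toNat_zero, List.drop_zero, Nat.sub_zero]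
  rw [show (c0 + 1).toNat = c0.toNat + 1 by omega]
  simp

theorem pvZipShift (x : String) (xs : List String) (hs cs : List Int)
    (hh : ∀ a ∈ hs, 0 ≤ a) (hc : ∀ b ∈ cs, 0 ≤ b) :
    ((hs.map (· + 1)).zip (cs.map (· + 1))).map (fun hn =>
        (PySem.Str.strip (PySem.Str.slice (PySem.List.pyGetD (x :: xs) hn.1 "") (some 3) none),
         PySem.List.slice (x :: xs) (some (hn.1 + 1)) (some hn.2)))
      = (hs.zip cs).map (fun hn =>
        (PySem.Str.strip (PySem.Str.slice (PySem.List.pyGetD xs hn.1 "") (some 3) none),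
         PySem.List.slice xs (some (hn.1 + 1)) (some hn.2))) := by
  rw [List.zip_map, List.map_map]
  apply List.map_congr_left
  intro p hp
  have h1 : 0 ≤ p.1 := hh p.1 (List.of_mem_zip hp).1
  have h2 : 0 ≤ p.2 := hc p.2 (List.of_mem_zip hp).2
  simp only [Function.comp_def, Prod.map]
  rw [pvGetD_cons_shift _ _ _ _ h1, show p.1 + 1 + 1 = (p.1 + 1) + 1 from rfl,
    pvSlice_cons_shift _ _ _ _ (by omega) h2]

theorem pvTail_cons_neg (l : String) (rest : List String)
    (h : PySem.Str.startswith l "## " = false) : pvTail (l :: rest) = pvTail rest := by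
  rw [pvTail, pvTail, pvHeads_cons_neg l rest h, pvCuts_cons_neg l rest h,
    PySem.List.slice_from_one, PySem.List.slice_from_one]
  simp only [← List.drop_one, ← List.map_drop]
  exact pvZipShift l rest _ _ (pvHeads_nonneg rest)
    (fun b hb => pvCuts_nonneg rest b (List.mem_of_mem_drop hb))

theorem pvTail_cons_pos (l : String) (rest : List String)
    (h : PySem.Str.startswith l "## " = true) :
    pvTail (l :: rest) =
      (PySem.Str.strip (PySem.Str.slice l (some 3) none), pvLead rest) :: pvTail rest := by
  rw [pvTail, pvTail, pvHeads_cons_pos l rest h, pvCuts_cons_pos l rest h,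
    PySem.List.slice_from_one, PySem.List.slice_from_one, List.tail_cons]
  rcases hc : pvCuts rest with _ | ⟨c0, ct⟩
  · exact absurd hc (pvCuts_ne_nil rest)
  have hc0 : 0 ≤ c0 := pvCuts_nonneg rest c0 (by simp [hc])
  rw [List.map_cons, List.zip_cons_cons, List.map_cons]
  refine List.cons_eq_cons.mpr ⟨?_, ?_⟩
  · show (PySem.Str.strip (PySem.Str.slice (PySem.List.pyGetD (l :: rest) 0 "") (some 3) none),
      PySem.List.slice (l :: rest) (some (0 + 1)) (some (c0 + 1))) = _
    rw [PySem.List.pyGetD_zero_cons,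
      pvSlice_cons_shift _ _ _ _ le_rfl hc0, pvLead, hc, PySem.List.pyGetD_zero_cons]
  · rw [List.tail_cons,
      pvZipShift l rest _ _ (pvHeads_nonneg rest)
        (fun b hb => pvCuts_nonneg rest b (by rw [hc]; exact List.mem_cons_of_mem _ hb))]

theorem pvSegs_eq (lines : List String) :
    ∀ (t : String) (acc : List String),
      pvSegs t acc lines = (t, acc ++ pvLead lines) :: pvTail lines := by
  induction lines with
  | nil =>
    intro t acc
    have h1 : pvLead [] = [] := by decide
    have h2 : pvTail [] = [] := by decide
    simp [pvSegs, h1, h2]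
  | cons l rest ih =>
    intro t acc
    by_cases h : PySem.Str.startswith l "## " = true
    · rw [pvSegs, if_pos h, ih, pvLead_cons_pos l rest h, pvTail_cons_pos l rest h]
      simp
    · have h' : PySem.Str.startswith l "## " = false := eq_false_of_ne_true h
      rw [pvSegs, if_neg h, ih, pvLead_cons_neg l rest h', pvTail_cons_neg l rest h']
      simp

theorem pvAlt_eq (readme : String) :
    parse_readme_sections_alt readme =
      PySem.Str.join "\n\n"
        (((("Overview", pvLead (PySem.Str.splitlines readme)) ::
            pvTail (PySem.Str.splitlines readme)).foldl pvIns PySem.Dict.empty).items.map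
          (fun tc => tc.1 ++ ":\n" ++ tc.2)) := rfl

-- ===== VERDICT (by name: the statement is the Claim_ definition above) =====
theorem parse_readme_sections_spec : Claim_equal_parse_readme_sections := by
  intro readme _
  unfold Spec_parse_readme_sections
  by_cases he : readme = ""
  · subst he
    decide
  · rw [parse_readme_sections, if_neg he]
    simp only []
    rw [pvA_loop_eq, PySem.List.foldl_append_singleton_eq_map, List.nil_append,
      pvSegs_eq, List.nil_append, pvAlt_eq]
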